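-- pv_equiv track=rewrite | github.com/LuisaCardenasL/Proyecto-ADA | main.py | encontrar_animal_participacion
-- ===== SOURCE A (Python) =====
-- def encontrar_animal_participacion(partes):
--     animal_participacion = {}
--     for parte in partes:
--         for escena in parte:
--             for animal in escena:
--                 if animal in animal_participacion:
--                     animal_participacion[animal] += 1
--                 else:
--                     animal_participacion[animal] = 1
--     max_participacion = max(animal_participacion.values())
--     animales_max_participacion = [animal for animal, participacion in animal_participacion.items(
--     ) if participacion == max_participacion]
--     min_participacion = min(animal_participacion.values())
--     animales_min_participacion = [animal for animal, participacion in animal_participacion.items(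
--     ) if participacion == min_participacion]
--     return animales_max_participacion, max_participacion, animales_min_participacion, min_participacion
-- ===== SOURCE B (Python) =====
-- def encontrar_animal_participacion(partes):
--     conteo = {}
--     for parte in partes:
--         for escena in parte:
--             for animal in escena:
--                 conteo[animal] = conteo.get(animal, 0) + 1
--     items = iter(conteo.items())
--     animal, c = next(items)
--     maxa, maxc = [animal], c
--     mina, minc = [animal], c
--     for animal, c in items:
--         if c > maxc:
--             maxa, maxc = [animal], c
--         elif c == maxc:
--             maxa.append(animal)
--         if c < minc:
--             mina, minc = [animal], c
--         elif c == minc: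
--             mina.append(animal)
--     return maxa, maxc, mina, minc
-- ===== Notes on version B (the rewrite author's own statement) =====
-- stated objective: alternative
-- what changed: Replaces the max()/min() calls plus two filtering list comprehensions (four extra passes over the count dict) by a single pass over the items that maintains running max/min counts and their animal lists.
-- outside the precondition, e.g. on encontrar_animal_participacion([[[]]]): A raises ValueError, B raises StopIteration
import Mathlib
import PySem

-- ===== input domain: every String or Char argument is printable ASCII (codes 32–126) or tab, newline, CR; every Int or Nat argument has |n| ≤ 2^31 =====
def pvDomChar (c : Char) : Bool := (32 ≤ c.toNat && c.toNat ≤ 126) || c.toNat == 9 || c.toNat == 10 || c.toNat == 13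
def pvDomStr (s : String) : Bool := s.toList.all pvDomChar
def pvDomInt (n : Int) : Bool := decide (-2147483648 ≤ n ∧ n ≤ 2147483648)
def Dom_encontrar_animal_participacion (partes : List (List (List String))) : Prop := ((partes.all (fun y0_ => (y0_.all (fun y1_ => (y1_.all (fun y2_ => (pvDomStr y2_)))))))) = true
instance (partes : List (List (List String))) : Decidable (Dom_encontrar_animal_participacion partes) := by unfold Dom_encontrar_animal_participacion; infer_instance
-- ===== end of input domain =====

-- B replaces A's max()/min() plus two filtering comprehensions over the count dict
-- by one pass over its items maintaining running max/min counts and animal lists (alternative decomposition).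


-- ===== PORT A =====
def encontrar_animal_participacion (partes : List (List (List String))) : List String × Int × List String × Int :=
  let ap := partes.foldl (fun d parte => parte.foldl (fun d escena =>
      escena.foldl (fun d animal =>
        if d.contains animal then d.modify animal 0 (· + 1) else d.insert animal 1) d) d)
    PySem.Dict.empty
  -- max()/min() raise ValueError on an empty dict: those inputs are outside Pre_
  let maxp := (PySem.List.max? ap.values (fun v => v)).getD 0
  let amax := (ap.items.filter (fun q => q.2 == maxp)).map (·.1)
  let minp := (PySem.List.min? ap.values (fun v => v)).getD 0
  let amin := (ap.items.filter (fun q => q.2 == minp)).map (·.1)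
  (amax, maxp, amin, minp)

-- ===== PORT B =====
-- the two independent running accumulators of B's single pass: (maxa, maxc) and (mina, minc)
def pvStepMax (s : List String × Int) (p : String × Int) : List String × Int :=
  if s.2 < p.2 then ([p.1], p.2) else if p.2 == s.2 then (s.1 ++ [p.1], s.2) else s

def pvStepMin (s : List String × Int) (p : String × Int) : List String × Int :=
  if p.2 < s.2 then ([p.1], p.2) else if p.2 == s.2 then (s.1 ++ [p.1], s.2) else s

def pvStepB (s : (List String × Int) × (List String × Int)) (p : String × Int) :
    (List String × Int) × (List String × Int) :=
  (pvStepMax s.1 p, pvStepMin s.2 p)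

def encontrar_animal_participacion_alt (partes : List (List (List String))) : List String × Int × List String × Int :=
  let conteo := partes.foldl (fun d parte => parte.foldl (fun d escena =>
      escena.foldl (fun d animal => d.insert animal (d.getD animal 0 + 1)) d) d)
    PySem.Dict.empty
  match conteo.items with
  | [] => ([], 0, [], 0)   -- next() raises StopIteration on an empty dict: outside Pre_
  | (animal, c) :: rest =>
      let st := rest.foldl pvStepB (([animal], c), ([animal], c))
      (st.1.1, st.1.2, st.2.1, st.2.2)

-- ===== PRECONDITION & SPEC =====
-- Pre_ excludes inputs with no animal occurrence at all: there A raises ValueError (max of an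
-- empty sequence) and B raises StopIteration.
def Pre_encontrar_animal_participacion (partes : List (List (List String))) : Prop :=
  partes.flatten.flatten ≠ []
instance (partes : List (List (List String))) : Decidable (Pre_encontrar_animal_participacion partes) := by
  unfold Pre_encontrar_animal_participacion; infer_instance

def pvWitness_encontrar_animal_participacion : List (List (List String)) := [[["a"], ["b", "a"]]]

def Spec_encontrar_animal_participacion (partes : List (List (List String))) (out : List String × Int × List String × Int) : Prop := out = encontrar_animal_participacion_alt partes
instance (partes : List (List (List String))) (out : List String × Int × List String × Int) : Decidable (Spec_encontrar_animal_participacion partes out) := by unfold Spec_encontrar_animal_participacion; infer_instance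

-- ===== CLAIM (what is proved, stated in full; the proofs are below) =====
def Claim_equal_encontrar_animal_participacion : Prop := ∀ (partes : List (List (List String))), Dom_encontrar_animal_participacion partes → Pre_encontrar_animal_participacion partes → Spec_encontrar_animal_participacion partes (encontrar_animal_participacion partes)

-- ===== LEMMAS AND PROOFS =====

-- max / min of a nonempty list of values, as Python's running loop computes it
def pvVmax : List Int → Int
  | [] => 0
  | x :: t => t.foldl max x

def pvVmin : List Int → Int
  | [] => 0
  | x :: t => t.foldl min x

-- the state B's loop maintains after having consumed the item list l
def pvState (l : List (String × Int)) : (List String × Int) × (List String × Int) :=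
  (((l.filter (fun q => q.2 == pvVmax (l.map (·.2)))).map (·.1), pvVmax (l.map (·.2))),
   ((l.filter (fun q => q.2 == pvVmin (l.map (·.2)))).map (·.1), pvVmin (l.map (·.2))))

theorem pvVmax_append (v : List Int) (hv : v ≠ []) (c : Int) :
    pvVmax (v ++ [c]) = max (pvVmax v) c := by
  cases v with
  | nil => exact absurd rfl hv
  | cons x t => simp [pvVmax, List.foldl_append]

theorem pvVmin_append (v : List Int) (hv : v ≠ []) (c : Int) :
    pvVmin (v ++ [c]) = min (pvVmin v) c := by
  cases v with
  | nil => exact absurd rfl hv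
  | cons x t => simp [pvVmin, List.foldl_append]

theorem pvVmax_is_max (v : List Int) (y : Int) (hy : y ∈ v) : y ≤ pvVmax v := by
  cases v with
  | nil => cases hy
  | cons x t =>
      rcases List.mem_cons.mp hy with h | h
      · subst h; exact (PySem.List.le_foldl_max t y).1
      · exact (PySem.List.le_foldl_max t x).2 y h

theorem pvVmin_is_min (v : List Int) (y : Int) (hy : y ∈ v) : pvVmin v ≤ y := by
  cases v with
  | nil => cases hy
  | cons x t =>
      rcases List.mem_cons.mp hy with h | h
      · subst h; exact (PySem.List.foldl_min_le t y).1
      · exact (PySem.List.foldl_min_le t x).2 y h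

theorem pvStepMax_state (L : List (String × Int)) (hL : L ≠ []) (p : String × Int) :
    pvStepMax ((L.filter (fun q => q.2 == pvVmax (L.map (·.2)))).map (·.1), pvVmax (L.map (·.2))) p
      = ((((L ++ [p]).filter (fun q => q.2 == pvVmax ((L ++ [p]).map (·.2)))).map (·.1)),
          pvVmax ((L ++ [p]).map (·.2))) := by
  have hv : L.map (fun x => x.2) ≠ [] := by simpa using hL
  have happ : pvVmax (L.map (fun x => x.2) ++ [p.2]) = max (pvVmax (L.map (fun x => x.2))) p.2 :=
    pvVmax_append _ hv _
  simp only [List.map_append, List.map_cons, List.map_nil, List.filter_append, happ]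
  by_cases hlt : pvVmax (L.map (fun x => x.2)) < p.2
  · have h2 : max (pvVmax (L.map (fun x => x.2))) p.2 = p.2 := max_eq_right hlt.le
    have hfil : L.filter (fun q => q.2 == p.2) = [] := by
      rw [List.filter_eq_nil_iff]
      intro q hq hbe
      have h1 : q.2 ≤ pvVmax (L.map (fun x => x.2)) :=
        pvVmax_is_max _ _ (List.mem_map_of_mem hq)
      have h3 : q.2 = p.2 := by simpa using hbe
      omega
    rw [h2]
    simp [pvStepMax, hlt, hfil]
  · have h2 : max (pvVmax (L.map (fun x => x.2))) p.2 = pvVmax (L.map (fun x => x.2)) :=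
      max_eq_left (not_lt.mp hlt)
    rw [h2]
    by_cases heq : p.2 = pvVmax (L.map (fun x => x.2))
    · simp [pvStepMax, heq]
    · have hb : (p.2 == pvVmax (L.map (fun x => x.2))) = false := by simpa using heq
      simp [pvStepMax, hlt, hb]

theorem pvStepMin_state (L : List (String × Int)) (hL : L ≠ []) (p : String × Int) :
    pvStepMin ((L.filter (fun q => q.2 == pvVmin (L.map (·.2)))).map (·.1), pvVmin (L.map (·.2))) p
      = ((((L ++ [p]).filter (fun q => q.2 == pvVmin ((L ++ [p]).map (·.2)))).map (·.1)),
          pvVmin ((L ++ [p]).map (·.2))) := by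
  have hv : L.map (fun x => x.2) ≠ [] := by simpa using hL
  have happ : pvVmin (L.map (fun x => x.2) ++ [p.2]) = min (pvVmin (L.map (fun x => x.2))) p.2 :=
    pvVmin_append _ hv _
  simp only [List.map_append, List.map_cons, List.map_nil, List.filter_append, happ]
  by_cases hlt : p.2 < pvVmin (L.map (fun x => x.2))
  · have h2 : min (pvVmin (L.map (fun x => x.2))) p.2 = p.2 := min_eq_right hlt.le
    have hfil : L.filter (fun q => q.2 == p.2) = [] := by
      rw [List.filter_eq_nil_iff]
      intro q hq hbe
      have h1 : pvVmin (L.map (fun x => x.2)) ≤ q.2 :=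
        pvVmin_is_min _ _ (List.mem_map_of_mem hq)
      have h3 : q.2 = p.2 := by simpa using hbe
      omega
    rw [h2]
    simp [pvStepMin, hlt, hfil]
  · have h2 : min (pvVmin (L.map (fun x => x.2))) p.2 = pvVmin (L.map (fun x => x.2)) :=
      min_eq_left (not_lt.mp hlt)
    rw [h2]
    by_cases heq : p.2 = pvVmin (L.map (fun x => x.2))
    · simp [pvStepMin, heq]
    · have hb : (p.2 == pvVmin (L.map (fun x => x.2))) = false := by simpa using heq
      simp [pvStepMin, hlt, hb]

theorem pvStepB_state (L : List (String × Int)) (hL : L ≠ []) (p : String × Int) :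
    pvStepB (pvState L) p = pvState (L ++ [p]) := by
  simp only [pvStepB, pvState]
  exact Prod.ext (pvStepMax_state L hL p) (pvStepMin_state L hL p)

theorem pvLoopB (rest : List (String × Int)) :
    ∀ (L : List (String × Int)), L ≠ [] →
      rest.foldl pvStepB (pvState L) = pvState (L ++ rest) := by
  induction rest with
  | nil => intro L _; simp
  | cons p rest ih =>
      intro L hL
      rw [List.foldl_cons, pvStepB_state L hL p, ih (L ++ [p]) (by simp)]
      simp

theorem pvState_single (q : String × Int) : pvState [q] = (([q.1], q.2), ([q.1], q.2)) := by
  simp [pvState, pvVmax, pvVmin]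

-- the two counting loops build the same dict
theorem pvCountStep_eq :
    (fun (d : PySem.Dict String Int) animal =>
        if d.contains animal then d.modify animal 0 (· + 1) else d.insert animal 1)
      = (fun (d : PySem.Dict String Int) animal => d.insert animal (d.getD animal 0 + 1)) := by
  funext d x
  by_cases h : d.contains x = true
  · simp [h, PySem.Dict.modify]
  · have hg : d.getD x 0 = 0 := by
      have : d.items.find? (fun p => p.1 == x) = none := by
        rw [List.find?_eq_none]
        intro p hp
        have := List.any_eq_false.mp (Bool.eq_false_iff.mpr h ▸ rfl : d.contains x = false) p hp
        simpa using this
      simp [PySem.Dict.getD, PySem.Dict.get?, this]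
    simp [h, hg]

theorem pvDict_items_ne (partes : List (List (List String)))
    (hne : partes.flatten.flatten ≠ []) :
    (partes.foldl (fun d parte => parte.foldl (fun d escena =>
        escena.foldl (fun d animal => d.insert animal (d.getD animal 0 + 1)) d) d)
      (PySem.Dict.empty : PySem.Dict String Int)).items ≠ [] := by
  rw [← List.foldl_flatten, ← List.foldl_flatten]
  set animals := partes.flatten.flatten with hA
  obtain ⟨a, t, hat⟩ : ∃ a t, animals = a :: t := by
    cases h : animals with
    | nil => exact absurd h hne
    | cons a t => exact ⟨a, t, rfl⟩
  have hkeys : (animals.foldl (fun d x => d.insert x (d.getD x 0 + 1))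
      (PySem.Dict.empty : PySem.Dict String Int)).keys
      = PySem.Set.update ((PySem.Dict.empty : PySem.Dict String Int)).keys animals :=
    PySem.Dict.keys_foldl_insert animals (fun d x => d.getD x 0 + 1) _
  have hek : ((PySem.Dict.empty : PySem.Dict String Int)).keys = [] := rfl
  rw [hek, PySem.Set.update_nil_left] at hkeys
  intro hitems
  have hk : (animals.foldl (fun d x => d.insert x (d.getD x 0 + 1))
      (PySem.Dict.empty : PySem.Dict String Int)).keys = [] := by
    simp [PySem.Dict.keys, hitems]
  rw [hkeys] at hk
  have hma : a ∈ PySem.Set.ofList animals := (PySem.Set.mem_ofList animals a).mpr (by simp [hat])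
  rw [hk] at hma
  cases hma

-- ===== VERDICT (by name: the statement is the Claim_ definition above) =====
theorem encontrar_animal_participacion_spec : Claim_equal_encontrar_animal_participacion := by
  intro partes _ hpre
  unfold Spec_encontrar_animal_participacion
  unfold encontrar_animal_participacion encontrar_animal_participacion_alt
  rw [pvCountStep_eq]
  set D := partes.foldl (fun d parte => parte.foldl (fun d escena =>
      escena.foldl (fun d animal => d.insert animal (d.getD animal 0 + 1)) d) d)
    (PySem.Dict.empty : PySem.Dict String Int) with hD
  have hitems : D.items ≠ [] := pvDict_items_ne partes hpre
  obtain ⟨q, rest, hqr⟩ : ∃ q rest, D.items = q :: rest := by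
    cases h : D.items with
    | nil => exact absurd h hitems
    | cons q rest => exact ⟨q, rest, rfl⟩
  have hvals : D.values = q.2 :: rest.map (·.2) := by
    simp [PySem.Dict.values, hqr]
  have hmax : (PySem.List.max? D.values (fun v => v)).getD 0 = pvVmax (D.items.map (·.2)) := by
    rw [hvals, PySem.List.max?_id_cons]
    simp [hqr, pvVmax]
  have hmin : (PySem.List.min? D.values (fun v => v)).getD 0 = pvVmin (D.items.map (·.2)) := by
    rw [hvals, PySem.List.min?_id_cons]
    simp [hqr, pvVmin]
  have hloop : rest.foldl pvStepB (([q.1], q.2), ([q.1], q.2)) = pvState D.items := by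
    rw [← pvState_single q, pvLoopB rest [q] (by simp)]
    simp [hqr]
  simp only [hqr]
  have hq : q = (q.1, q.2) := rfl
  conv_rhs => rw [hq]
  simp only [hloop, hmax, hmin, pvState, hqr]
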